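-- pv_equiv track=rewrite | github.com/mait-systems/MAIT.gen | powertrain-agent/agent_powertrain.py | _extract_alert_level
-- ===== SOURCE A (Python) =====
-- def _extract_alert_level(ai_analysis: str) -> str:
--     """Extract alert level from AI analysis text"""
--     analysis_lower = ai_analysis.lower()
--
--     # Look for the overall assessment specifically
--     if 'overall assessment: healthy' in analysis_lower or 'overall assessment: normal' in analysis_lower:
--         return 'OK'
--     elif 'overall assessment: critical' in analysis_lower or 'overall assessment: danger' in analysis_lower:
--         return 'CRITICAL'
--     elif 'overall assessment: warning' in analysis_lower or 'overall assessment: caution' in analysis_lower: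
--         return 'WARNING'
--
--     # Fallback to general keyword checking with more specific terms
--     elif any(phrase in analysis_lower for phrase in ['immediate shutdown', 'critical failure', 'immediate danger']):
--         return 'CRITICAL'
--     elif any(phrase in analysis_lower for phrase in ['requires attention', 'warning level', 'caution needed']):
--         return 'WARNING'
--     elif any(word in analysis_lower for word in ['normal', 'healthy', 'good', 'optimal', 'stable']):
--         return 'OK'
--     else:
--         return 'INFO'
-- ===== SOURCE B (Python) =====
-- # B: multi-pattern single scan of the text — walk every position of the lowered
-- # text once and record the best (lowest) priority rank of any phrase starting
-- # there; the level is looked up from the rank at the end. No per-phrase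
-- # substring searches and no elif cascade.
-- PATTERNS = [
--     ('overall assessment: healthy', 0), ('overall assessment: normal', 0),
--     ('overall assessment: critical', 1), ('overall assessment: danger', 1),
--     ('overall assessment: warning', 2), ('overall assessment: caution', 2),
--     ('immediate shutdown', 3), ('critical failure', 3), ('immediate danger', 3),
--     ('requires attention', 4), ('warning level', 4), ('caution needed', 4),
--     ('normal', 5), ('healthy', 5), ('good', 5), ('optimal', 5), ('stable', 5),
-- ]
-- LEVELS = ['OK', 'CRITICAL', 'WARNING', 'CRITICAL', 'WARNING', 'OK']
--
-- def _extract_alert_level(ai_analysis: str) -> str: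
--     text = ai_analysis.lower()
--     best = len(LEVELS)          # 6 = nothing found yet
--     for j in range(len(text) + 1):
--         for phrase, rank in PATTERNS:
--             if rank < best and text.startswith(phrase, j):
--                 best = rank
--     return LEVELS[best] if best < len(LEVELS) else 'INFO'
-- ===== Notes on version B (the rewrite author's own statement) =====
-- stated objective: alternative
-- what changed: Replaces A's elif cascade of per-phrase substring searches by a single multi-pattern scan of the lowered text: every text position is visited once, recording the lowest priority rank of any phrase starting there, and the alert level is looked up from that rank at the end.
import Mathlib
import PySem

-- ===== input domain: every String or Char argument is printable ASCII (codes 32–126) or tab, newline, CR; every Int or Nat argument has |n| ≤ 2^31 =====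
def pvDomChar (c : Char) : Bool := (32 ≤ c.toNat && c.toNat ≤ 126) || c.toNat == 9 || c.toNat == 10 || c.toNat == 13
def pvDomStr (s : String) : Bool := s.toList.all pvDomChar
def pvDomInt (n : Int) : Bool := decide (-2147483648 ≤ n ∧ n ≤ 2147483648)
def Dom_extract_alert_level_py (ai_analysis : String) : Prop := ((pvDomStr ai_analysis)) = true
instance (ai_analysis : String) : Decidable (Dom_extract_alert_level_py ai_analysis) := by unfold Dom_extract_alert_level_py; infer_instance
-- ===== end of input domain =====

-- B replaces A's per-phrase substring searches and elif cascade by ONE scan of the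
-- lowered text: at each position it records the best (lowest) rank of any phrase
-- starting there, and looks the level up from the rank at the end (alternative, same cost).

-- ===== PORT A =====
def extract_alert_level_py (ai_analysis : String) : String :=
  let analysis_lower := PySem.Str.lower ai_analysis
  if PySem.Str.isIn "overall assessment: healthy" analysis_lower
     || PySem.Str.isIn "overall assessment: normal" analysis_lower then "OK"
  else if PySem.Str.isIn "overall assessment: critical" analysis_lower
     || PySem.Str.isIn "overall assessment: danger" analysis_lower then "CRITICAL"
  else if PySem.Str.isIn "overall assessment: warning" analysis_lower
     || PySem.Str.isIn "overall assessment: caution" analysis_lower then "WARNING"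
  else if (["immediate shutdown", "critical failure", "immediate danger"]).any
            (fun phrase => PySem.Str.isIn phrase analysis_lower) then "CRITICAL"
  else if (["requires attention", "warning level", "caution needed"]).any
            (fun phrase => PySem.Str.isIn phrase analysis_lower) then "WARNING"
  else if (["normal", "healthy", "good", "optimal", "stable"]).any
            (fun word => PySem.Str.isIn word analysis_lower) then "OK"
  else "INFO"

-- ===== PORT B =====
def pvPatterns : List (String × Nat) :=
  [ ("overall assessment: healthy", 0), ("overall assessment: normal", 0),
    ("overall assessment: critical", 1), ("overall assessment: danger", 1),
    ("overall assessment: warning", 2), ("overall assessment: caution", 2),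
    ("immediate shutdown", 3), ("critical failure", 3), ("immediate danger", 3),
    ("requires attention", 4), ("warning level", 4), ("caution needed", 4),
    ("normal", 5), ("healthy", 5), ("good", 5), ("optimal", 5), ("stable", 5) ]

def pvLevels : List String := ["OK", "CRITICAL", "WARNING", "CRITICAL", "WARNING", "OK"]

-- text.startswith(phrase, j) with 0 ≤ j is exactly: phrase is a prefix of text[j:]
-- (PySem.Chars.startswith on t.drop j); LEVELS[best] with best < len is List.getD.
def extract_alert_level_py_alt (ai_analysis : String) : String :=
  let text := (PySem.Str.lower ai_analysis).toList
  let best := (List.range (text.length + 1)).foldl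
    (fun b j => pvPatterns.foldl
      (fun b' pat =>
        if pat.2 < b' ∧ PySem.Chars.startswith (text.drop j) pat.1.toList = true
        then pat.2 else b') b)
    pvLevels.length
  if best < pvLevels.length then pvLevels.getD best "INFO" else "INFO"

-- ===== PRECONDITION & SPEC =====
def Spec_extract_alert_level_py (ai_analysis : String) (out : String) : Prop := out = extract_alert_level_py_alt ai_analysis
instance (ai_analysis : String) (out : String) : Decidable (Spec_extract_alert_level_py ai_analysis out) := by unfold Spec_extract_alert_level_py; infer_instance

-- ===== CLAIM (what is proved, stated in full; the proofs are below) =====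
def Claim_equal_extract_alert_level_py : Prop := ∀ (ai_analysis : String), Dom_extract_alert_level_py ai_analysis → Spec_extract_alert_level_py ai_analysis (extract_alert_level_py ai_analysis)

-- ===== LEMMAS AND PROOFS =====

-- proof-only names for the two folds of B
def pvInner (t : List Char) (j : Nat) (b : Nat) : Nat :=
  pvPatterns.foldl
    (fun b' pat =>
      if pat.2 < b' ∧ PySem.Chars.startswith (t.drop j) pat.1.toList = true
      then pat.2 else b') b

def pvBest (t : List Char) : Nat :=
  (List.range (t.length + 1)).foldl (fun b j => pvInner t j b) 6

-- "some phrase of rank r occurs in t"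
def pvC (t : List Char) (r : Nat) : Prop :=
  ∃ pat ∈ pvPatterns, pat.2 = r ∧ PySem.Chars.isIn pat.1.toList t = true

lemma pvFoldl_le {α : Type} (f : Nat → α → Nat) (h : ∀ b x, f b x ≤ b) :
    ∀ (L : List α) (b : Nat), L.foldl f b ≤ b
  | [], _ => le_refl _
  | x :: L, b => le_trans (pvFoldl_le f h L (f b x)) (h b x)

lemma pvFoldl_hit {α : Type} (f : Nat → α → Nat) (h : ∀ b x, f b x ≤ b)
    {x : α} {B0 : Nat} (hx : ∀ b, f b x ≤ B0) :
    ∀ (L : List α) (b : Nat), x ∈ L → L.foldl f b ≤ B0 := by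
  intro L
  induction L with
  | nil => intro b hb; cases hb
  | cons y L ih =>
    intro b hb
    rcases List.mem_cons.mp hb with rfl | hmem
    · exact le_trans (pvFoldl_le f h L (f b x)) (hx b)
    · exact ih (f b y) hmem

lemma pvFoldl_inv {α : Type} (f : Nat → α → Nat) (I : Nat → Prop) :
    ∀ (L : List α) (b : Nat), (∀ b x, x ∈ L → I b → I (f b x)) → I b → I (L.foldl f b) := by
  intro L
  induction L with
  | nil => intro b _ hI; exact hI
  | cons y L ih =>
    intro b hstep hI
    exact ih (f b y) (fun b' x hx => hstep b' x (List.mem_cons_of_mem _ hx))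
      (hstep b y (List.mem_cons_self) hI)

lemma pvStep_le (t : List Char) (j : Nat) :
    ∀ (b : Nat) (pat : String × Nat),
      (if pat.2 < b ∧ PySem.Chars.startswith (t.drop j) pat.1.toList = true
       then pat.2 else b) ≤ b := by
  intro b pat; split_ifs with h
  · exact le_of_lt h.1
  · exact le_refl b

lemma pvInner_le (t : List Char) (j b : Nat) : pvInner t j b ≤ b :=
  pvFoldl_le _ (pvStep_le t j) _ b

lemma pvInner_hit (t : List Char) (j b : Nat) {pat : String × Nat}
    (hmem : pat ∈ pvPatterns)
    (hsw : PySem.Chars.startswith (t.drop j) pat.1.toList = true) :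
    pvInner t j b ≤ pat.2 := by
  refine pvFoldl_hit _ (pvStep_le t j) (fun b' => ?_) _ b hmem
  by_cases h : pat.2 < b'
  · simp [h, hsw]
  · simp [h, hsw]; omega

lemma pvBest_le_of_hit (t : List Char) {j : Nat} {pat : String × Nat}
    (hj : j < t.length + 1) (hmem : pat ∈ pvPatterns)
    (hsw : PySem.Chars.startswith (t.drop j) pat.1.toList = true) :
    pvBest t ≤ pat.2 := by
  refine pvFoldl_hit (fun b j => pvInner t j b)
    (fun b j' => pvInner_le t j' b) (fun b => pvInner_hit t j b hmem hsw)
    _ 6 (List.mem_range.mpr hj)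

lemma pvBest_le_of_C (t : List Char) {r : Nat} (hC : pvC t r) : pvBest t ≤ r := by
  obtain ⟨pat, hmem, hr, hin⟩ := hC
  obtain ⟨j, hpre⟩ := (PySem.Chars.exists_prefix_drop_iff_isIn pat.1.toList t).mpr hin
  have hne : pat.1.toList ≠ [] := by fin_cases hmem <;> decide
  have hj : j < t.length + 1 := by
    by_contra hle
    have : t.drop j = [] := List.drop_eq_nil_of_le (by omega)
    rw [this] at hpre
    exact hne (List.prefix_nil.mp hpre)
  exact hr ▸ pvBest_le_of_hit t hj hmem ((PySem.Chars.startswith_iff _ _).mpr hpre)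

lemma pvBest_inv (t : List Char) : pvBest t = 6 ∨ pvC t (pvBest t) := by
  refine pvFoldl_inv _ (fun b => b = 6 ∨ pvC t b) _ 6 ?_ (Or.inl rfl)
  intro b j hjmem hI
  refine pvFoldl_inv _ (fun b => b = 6 ∨ pvC t b) _ b ?_ hI
  intro b' pat hpmem hI'
  split_ifs with h
  · right
    refine ⟨pat, hpmem, rfl, ?_⟩
    exact (PySem.Chars.exists_prefix_drop_iff_isIn pat.1.toList t).mp
      ⟨j, (PySem.Chars.startswith_iff _ _).mp h.2⟩
  · exact hI'

lemma pvC_lt (t : List Char) {r : Nat} (hC : pvC t r) : r < 6 := by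
  obtain ⟨pat, hmem, hr, _⟩ := hC
  fin_cases hmem <;> omega

lemma pvC0 (t : List Char) : pvC t 0 ↔
    (PySem.Chars.isIn "overall assessment: healthy".toList t = true ∨
     PySem.Chars.isIn "overall assessment: normal".toList t = true) := by
  simp [pvC, pvPatterns]

lemma pvC1 (t : List Char) : pvC t 1 ↔
    (PySem.Chars.isIn "overall assessment: critical".toList t = true ∨
     PySem.Chars.isIn "overall assessment: danger".toList t = true) := by
  simp [pvC, pvPatterns]

lemma pvC2 (t : List Char) : pvC t 2 ↔
    (PySem.Chars.isIn "overall assessment: warning".toList t = true ∨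
     PySem.Chars.isIn "overall assessment: caution".toList t = true) := by
  simp [pvC, pvPatterns]

lemma pvC3 (t : List Char) : pvC t 3 ↔
    (PySem.Chars.isIn "immediate shutdown".toList t = true ∨
     PySem.Chars.isIn "critical failure".toList t = true ∨
     PySem.Chars.isIn "immediate danger".toList t = true) := by
  simp [pvC, pvPatterns]

lemma pvC4 (t : List Char) : pvC t 4 ↔
    (PySem.Chars.isIn "requires attention".toList t = true ∨
     PySem.Chars.isIn "warning level".toList t = true ∨
     PySem.Chars.isIn "caution needed".toList t = true) := by
  simp [pvC, pvPatterns]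

lemma pvC5 (t : List Char) : pvC t 5 ↔
    (PySem.Chars.isIn "normal".toList t = true ∨
     PySem.Chars.isIn "healthy".toList t = true ∨
     PySem.Chars.isIn "good".toList t = true ∨
     PySem.Chars.isIn "optimal".toList t = true ∨
     PySem.Chars.isIn "stable".toList t = true) := by
  simp [pvC, pvPatterns]

lemma pvAlt_eq (s : String) :
    extract_alert_level_py_alt s =
      (if pvBest ((PySem.Str.lower s).toList) < 6
       then pvLevels.getD (pvBest ((PySem.Str.lower s).toList)) "INFO" else "INFO") := rfl

-- ===== VERDICT (by name: the statement is the Claim_ definition above) =====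
theorem extract_alert_level_py_spec : Claim_equal_extract_alert_level_py := by
  intro s _
  unfold Spec_extract_alert_level_py
  rw [pvAlt_eq]
  set t := (PySem.Str.lower s).toList with ht
  have hinv := pvBest_inv t
  unfold extract_alert_level_py
  simp only [List.any_cons, List.any_nil, Bool.or_false, PySem.Str.isIn_eq, ← ht]
  by_cases h0 : pvC t 0
  · have hb : pvBest t = 0 := Nat.le_zero.mp (pvBest_le_of_C t h0)
    rw [pvC0 t] at h0
    clear hinv
    rcases h0 with h | h <;> simp_all [pvLevels]
  · by_cases h1 : pvC t 1
    · have hub := pvBest_le_of_C t h1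
      have hb : pvBest t = 1 := by
        rcases hinv with h6 | hc
        · omega
        · interval_cases h : (pvBest t)
          · exact absurd hc h0
          · rfl
      rw [pvC0 t] at h0; rw [pvC1 t] at h1
      push Not at h0
      clear hinv
      rcases h1 with h | h <;> simp_all [pvLevels]
    · by_cases h2 : pvC t 2
      · have hub := pvBest_le_of_C t h2
        have hb : pvBest t = 2 := by
          rcases hinv with h6 | hc
          · omega
          · interval_cases h : (pvBest t)
            · exact absurd hc h0
            · exact absurd hc h1
            · rfl
        rw [pvC0 t] at h0; rw [pvC1 t] at h1; rw [pvC2 t] at h2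
        push Not at h0 h1
        clear hinv
        rcases h2 with h | h <;> simp_all [pvLevels]
      · by_cases h3 : pvC t 3
        · have hub := pvBest_le_of_C t h3
          have hb : pvBest t = 3 := by
            rcases hinv with h6 | hc
            · omega
            · interval_cases h : (pvBest t)
              · exact absurd hc h0
              · exact absurd hc h1
              · exact absurd hc h2
              · rfl
          rw [pvC0 t] at h0; rw [pvC1 t] at h1; rw [pvC2 t] at h2; rw [pvC3 t] at h3
          push Not at h0 h1 h2
          clear hinv
          rcases h3 with h | h | h <;> simp_all [pvLevels]
        · by_cases h4 : pvC t 4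
          · have hub := pvBest_le_of_C t h4
            have hb : pvBest t = 4 := by
              rcases hinv with h6 | hc
              · omega
              · interval_cases h : (pvBest t)
                · exact absurd hc h0
                · exact absurd hc h1
                · exact absurd hc h2
                · exact absurd hc h3
                · rfl
            rw [pvC0 t] at h0; rw [pvC1 t] at h1; rw [pvC2 t] at h2
            rw [pvC3 t] at h3; rw [pvC4 t] at h4
            push Not at h0 h1 h2 h3
            clear hinv
            rcases h4 with h | h | h <;> simp_all [pvLevels]
          · by_cases h5 : pvC t 5
            · have hub := pvBest_le_of_C t h5
              have hb : pvBest t = 5 := by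
                rcases hinv with h6 | hc
                · omega
                · interval_cases h : (pvBest t)
                  · exact absurd hc h0
                  · exact absurd hc h1
                  · exact absurd hc h2
                  · exact absurd hc h3
                  · exact absurd hc h4
                  · rfl
              rw [pvC0 t] at h0; rw [pvC1 t] at h1; rw [pvC2 t] at h2
              rw [pvC3 t] at h3; rw [pvC4 t] at h4; rw [pvC5 t] at h5
              push Not at h0 h1 h2 h3 h4
              clear hinv
              rcases h5 with h | h | h | h | h <;> simp_all [pvLevels]
            · have hb : pvBest t = 6 := by
                rcases hinv with h6 | hc
                · exact h6
                · have := pvC_lt t hc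
                  interval_cases h : (pvBest t)
                  · exact absurd hc h0
                  · exact absurd hc h1
                  · exact absurd hc h2
                  · exact absurd hc h3
                  · exact absurd hc h4
                  · exact absurd hc h5
              rw [pvC0 t] at h0; rw [pvC1 t] at h1; rw [pvC2 t] at h2
              rw [pvC3 t] at h3; rw [pvC4 t] at h4; rw [pvC5 t] at h5
              push Not at h0 h1 h2 h3 h4 h5
              clear hinv
              simp_all
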